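-- pv_equiv track=rewrite | github.com/caiyu1999/qiuzhao_ai4s_agent | openevolve_graph/utils/utils.py | parse_evolve_blocks
-- ===== SOURCE A (Python) =====
-- from typing import List
-- from typing import Dict, List, Optional, Tuple, Union
--
-- def parse_evolve_blocks(code: str) -> List[Tuple[int, int, str]]:
--     """
--     Parse evolve blocks from code
--
--     Args:
--         code: Source code with evolve blocks
--
--     Returns:
--         List of tuples (start_line, end_line, block_content)
--     """
--     lines = code.split("\n")
--     blocks = []
--
--     in_block = False
--     start_line = -1
--     block_content = []
--
--     for i, line in enumerate(lines):
--         if "# EVOLVE-BLOCK-START" in line: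
--             in_block = True
--             start_line = i
--             block_content = []
--         elif "# EVOLVE-BLOCK-END" in line and in_block:
--             in_block = False
--             blocks.append((start_line, i, "\n".join(block_content)))
--         elif in_block:
--             block_content.append(line)
--
--     return blocks
-- ===== SOURCE B (Python) =====
-- START_MARKER = "# EVOLVE-BLOCK-START"
-- END_MARKER = "# EVOLVE-BLOCK-END"
--
--
-- def parse_evolve_blocks(code):
--     lines = code.split("\n")
--     # First pass: reduce the input to a compact list of marker events.
--     events = []
--     for i, line in enumerate(lines):
--         if START_MARKER in line:
--             events.append((i, True))
--         elif END_MARKER in line: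
--             events.append((i, False))
--     # Second pass: pair events; block content is a slice of the original lines.
--     blocks = []
--     in_block = False
--     start_line = -1
--     for i, is_start in events:
--         if is_start:
--             in_block = True
--             start_line = i
--         elif in_block:
--             in_block = False
--             blocks.append((start_line, i, "\n".join(lines[start_line + 1:i])))
--     return blocks
-- ===== Notes on version B (the rewrite author's own statement) =====
-- stated objective: alternative
-- what changed: B replaces A's single stateful loop with a line-content accumulator by two passes: one scan collecting marker events (index, kind), then a fold over only the events that emits each block by slicing the original lines between the paired markers.
import Mathlib
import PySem

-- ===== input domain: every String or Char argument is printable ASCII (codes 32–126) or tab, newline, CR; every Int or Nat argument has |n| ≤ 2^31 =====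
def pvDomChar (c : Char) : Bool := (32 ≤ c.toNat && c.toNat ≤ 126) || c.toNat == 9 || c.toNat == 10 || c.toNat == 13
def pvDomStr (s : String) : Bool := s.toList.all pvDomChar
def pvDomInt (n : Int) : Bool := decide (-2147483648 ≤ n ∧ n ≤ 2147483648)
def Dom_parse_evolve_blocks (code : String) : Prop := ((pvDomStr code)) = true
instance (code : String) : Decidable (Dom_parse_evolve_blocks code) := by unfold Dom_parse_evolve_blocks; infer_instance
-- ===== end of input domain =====

-- B parses the markers in two passes (event list, then pairing with slices of the
-- original lines) instead of A's single loop with a content accumulator; same cost.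

-- ===== PORT A =====
def pvStartM : String := "# EVOLVE-BLOCK-START"
def pvEndM : String := "# EVOLVE-BLOCK-END"

def pvStepA (st : List (Int × Int × String) × Bool × Int × List String)
    (p : Int × String) : List (Int × Int × String) × Bool × Int × List String :=
  if PySem.Str.isIn pvStartM p.2 then (st.1, true, p.1, [])
  else if PySem.Str.isIn pvEndM p.2 && st.2.1 then
    (st.1 ++ [(st.2.2.1, p.1, PySem.Str.join "\n" st.2.2.2)], false, st.2.2.1, st.2.2.2)
  else if st.2.1 then (st.1, st.2.1, st.2.2.1, st.2.2.2 ++ [p.2])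
  else st

-- split? is always `some` here: the separator "\n" is a nonempty literal
def parse_evolve_blocks (code : String) : List (Int × Int × String) :=
  let lines := (PySem.Str.split? code "\n").getD []
  ((PySem.List.enumerate lines 0).foldl pvStepA ([], false, -1, [])).1

-- ===== PORT B =====
def pvEvStep (evs : List (Int × Bool)) (p : Int × String) : List (Int × Bool) :=
  if PySem.Str.isIn pvStartM p.2 then evs ++ [(p.1, true)]
  else if PySem.Str.isIn pvEndM p.2 then evs ++ [(p.1, false)]
  else evs

def pvStepB (lines : List String) (st : List (Int × Int × String) × Bool × Int)
    (e : Int × Bool) : List (Int × Int × String) × Bool × Int :=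
  if e.2 then (st.1, true, e.1)
  else if st.2.1 then
    (st.1 ++ [(st.2.2, e.1,
        PySem.Str.join "\n" (PySem.List.slice lines (some (st.2.2 + 1)) (some e.1)))],
      false, st.2.2)
  else st

def parse_evolve_blocks_alt (code : String) : List (Int × Int × String) :=
  let lines := (PySem.Str.split? code "\n").getD []
  (((PySem.List.enumerate lines 0).foldl pvEvStep []).foldl (pvStepB lines) ([], false, -1)).1

-- ===== PRECONDITION & SPEC =====
def Spec_parse_evolve_blocks (code : String) (out : List (Int × Int × String)) : Prop := out = parse_evolve_blocks_alt code
instance (code : String) (out : List (Int × Int × String)) : Decidable (Spec_parse_evolve_blocks code out) := by unfold Spec_parse_evolve_blocks; infer_instance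

-- ===== CLAIM (what is proved, stated in full; the proofs are below) =====
def Claim_equal_parse_evolve_blocks : Prop := ∀ (code : String), Dom_parse_evolve_blocks code → Spec_parse_evolve_blocks code (parse_evolve_blocks code)

-- ===== LEMMAS AND PROOFS =====

lemma pvEvStep_eq (acc : List (Int × Bool)) (p : Int × String) :
    pvEvStep acc p = acc ++ pvEvStep [] p := by
  unfold pvEvStep; split_ifs <;> simp

lemma pvEvents_acc (l : List (Int × String)) (acc : List (Int × Bool)) :
    l.foldl pvEvStep acc = acc ++ l.foldl pvEvStep [] := by
  induction l generalizing acc with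
  | nil => simp
  | cons p l ih =>
      simp only [List.foldl_cons]
      rw [ih (pvEvStep acc p), ih (pvEvStep [] p), pvEvStep_eq acc p, List.append_assoc]

lemma pvMain (lines : List String) :
    ∀ (rest : List String) (j : ℕ), rest = lines.drop j →
    ∀ (bl : List (Int × Int × String)) (inb : Bool) (s : Int) (content : List String),
    (inb = true → ∃ n : ℕ, s = (n : Int) ∧ n + 1 ≤ j ∧
        content = (lines.drop (n+1)).take (j - (n+1))) →
    ((PySem.List.enumerate rest (j : Int)).foldl pvStepA (bl, inb, s, content)).1
      = (((PySem.List.enumerate rest (j : Int)).foldl pvEvStep []).foldl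
          (pvStepB lines) (bl, inb, s)).1 := by
  intro rest
  induction rest with
  | nil => intro j _ bl inb s content _; simp [PySem.List.enumerate_nil]
  | cons line rest ih =>
      intro j hrest bl inb s content hinv
      have hrest' : rest = lines.drop (j + 1) := by
        have := congrArg List.tail hrest
        simpa [List.tail_drop] using this
      have hline : lines[j]? = some line := by
        have : (lines.drop j)[0]? = some line := by rw [← hrest]; simp
        simpa using this
      have hjlt : j < lines.length := by
        have := List.getElem?_eq_some_iff.mp hline
        exact this.1
      rw [PySem.List.enumerate_cons, List.foldl_cons, List.foldl_cons,
        pvEvents_acc, List.foldl_append]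
      have hcast : (j : Int) + 1 = ((j + 1 : ℕ) : Int) := by push_cast; ring
      by_cases hs : PySem.Str.isIn pvStartM line = true
      · -- start marker
        simp only [pvStepA, pvEvStep, pvStepB, hs, if_true, List.foldl_cons,
          List.foldl_nil, List.nil_append]
        rw [hcast]
        exact ih (j+1) hrest' bl true (j : Int) []
          (fun _ => ⟨j, rfl, le_refl _, by simp⟩)
      · by_cases he : PySem.Str.isIn pvEndM line = true
        · cases inb with
          | true =>
              obtain ⟨n, hsn, hnj, hc⟩ := hinv rfl
              have hslice : PySem.List.slice lines (some (s + 1)) (some (j : Int))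
                  = content := by
                rw [hsn, hc]
                have : ((n : Int)) + 1 = ((n + 1 : ℕ) : Int) := by push_cast; ring
                rw [this, PySem.List.slice_natCast]
              simp only [pvStepA, pvEvStep, pvStepB, hs, he, if_false, if_true,
                Bool.and_true, Bool.false_eq_true, List.foldl_cons, List.foldl_nil,
                List.nil_append, hslice]
              rw [hcast]
              exact ih (j+1) hrest' _ false s content (by simp)
          | false =>
              simp only [pvStepA, pvEvStep, pvStepB, hs, he, if_false, if_true,
                Bool.and_false, Bool.false_eq_true, List.foldl_cons, List.foldl_nil,
                List.nil_append]
              rw [hcast]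
              exact ih (j+1) hrest' bl false s content (by simp)
        · cases inb with
          | true =>
              obtain ⟨n, hsn, hnj, hc⟩ := hinv rfl
              simp only [pvStepA, pvEvStep, hs, he, if_false, Bool.false_and,
                Bool.false_eq_true, if_true]
              simp only [List.foldl_nil]
              rw [hcast]
              refine ih (j+1) hrest' bl true s (content ++ [line]) (fun _ => ⟨n, hsn, by omega, ?_⟩)
              have hidx : (lines.drop (n+1))[j - (n+1)]? = some line := by
                rw [List.getElem?_drop]
                rw [show n + 1 + (j - (n+1)) = j by omega]
                exact hline
              rw [hc, show j + 1 - (n+1) = (j - (n+1)) + 1 by omega, List.take_add_one, hidx]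
              simp
          | false =>
              simp only [pvStepA, pvEvStep, hs, he, if_false, Bool.false_and,
                Bool.false_eq_true]
              simp only [List.foldl_nil]
              rw [hcast]
              exact ih (j+1) hrest' bl false s content (by simp)

-- ===== VERDICT (by name: the statement is the Claim_ definition above) =====
theorem parse_evolve_blocks_spec : Claim_equal_parse_evolve_blocks := by
  intro code _
  unfold Spec_parse_evolve_blocks parse_evolve_blocks parse_evolve_blocks_alt
  have := pvMain ((PySem.Str.split? code "\n").getD []) ((PySem.Str.split? code "\n").getD []) 0
    (by simp) [] false (-1) [] (by simp)
  simpa using this
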